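-- pv_equiv track=rewrite | github.com/HCMUS-Thesis-AI-for-Music-Composition/Brainstorming | MIDI/midi_lib/fill_missing/nearest_line_fill.py | all_available_structure
-- ===== SOURCE A (Python) =====
-- def all_available_structure(next_acceptable_keys):
--     '''
--         List all possible paths in the graph (if a path meets the start of itself, stop searching on that path)
--         Return a list of all possible paths
--
--         next_acceptable_keys: a adjacency list of all possible next keys. Example:
--             {
--                 's': ['b', 'o'],
--                 'o': ['t'],
--                 't': ['i'],
--                 'i': ['p'],
--                 'p': ['d'],
--                 'd': ['v'],
--                 'v': ['i', 'b', 'p', 'o'],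
--                 'b': ['s']
--             }
--
--         Return: a list of all possible paths. Example:
--             [
--                 ['s', 'b'],
--                 ['s', 'o', 't', 'i', 'p', 'd', 'v'],
--                 ...
--             ]
--     '''
--     paths = []
--
--     def dfs(node: str, path: list):
--         if node in path:
--             paths.append(path)
--             return
--         else:
--             pass
--
--         path.append(node)
--
--         for next_node in next_acceptable_keys[node]:
--             dfs(next_node, path.copy())
--
--     for k in next_acceptable_keys.keys():
--         dfs(k, [])
--
--     return paths
-- ===== SOURCE B (Python) =====
-- def all_available_structure(next_acceptable_keys):
--     """Iterative DFS with an explicit LIFO stack of (node, path) frames instead of A's nested recursive dfs."""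
--     paths = []
--     for start in next_acceptable_keys:
--         stack = [(start, [])]
--         while stack:
--             node, path = stack.pop()
--             if node in path:
--                 paths.append(path)
--                 continue
--             new_path = path + [node]
--             for nxt in reversed(next_acceptable_keys[node]):
--                 stack.append((nxt, new_path))
--     return paths
-- ===== Notes on version B (the rewrite author's own statement) =====
-- stated objective: alternative
-- what changed: The nested recursive dfs with a mutated result list is replaced by an explicit LIFO stack of (node, path) frames, popped in a while loop, pushing each node's neighbours in reverse so the leftmost neighbour is expanded first; same pre-order, same recorded paths.
import Mathlib
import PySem

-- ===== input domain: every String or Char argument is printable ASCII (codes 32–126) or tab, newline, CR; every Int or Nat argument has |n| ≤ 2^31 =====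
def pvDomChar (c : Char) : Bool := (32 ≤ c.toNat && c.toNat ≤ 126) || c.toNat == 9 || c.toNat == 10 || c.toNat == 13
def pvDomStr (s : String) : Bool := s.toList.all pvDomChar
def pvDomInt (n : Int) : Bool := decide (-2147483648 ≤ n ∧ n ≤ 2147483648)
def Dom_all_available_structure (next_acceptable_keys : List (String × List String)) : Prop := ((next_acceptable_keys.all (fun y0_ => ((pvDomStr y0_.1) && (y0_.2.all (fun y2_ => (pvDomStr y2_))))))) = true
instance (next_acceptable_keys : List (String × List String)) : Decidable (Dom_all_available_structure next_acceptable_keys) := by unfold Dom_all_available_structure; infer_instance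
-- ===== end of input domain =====

-- B replaces A's nested recursive dfs by an explicit LIFO stack of (node, path) frames: a
-- different decomposition of the same enumeration, same output order (objective: alternative).


-- ===== PORT A =====
-- first-match lookup in the association list (Python's next_acceptable_keys[node]; a missing
-- key is a KeyError in Python — such inputs are excluded by Pre_, the [] default is never reached there)
def pvAdj (d : List (String × List String)) (node : String) : List String :=
  match d with
  | [] => []
  | (k, vs) :: rest => if k = node then vs else pvAdj rest node

-- A's nested recursive dfs; it returns the list of paths this call appends to the nonlocal
-- `paths`. The Nat fuel only makes the recursion structural: under Pre_ a path is a nodup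
-- list of keys, so fuel `length + 1` is never exhausted (proved below).
def pvDfsA (d : List (String × List String)) : Nat → String → List String → List (List String)
  | 0, _, _ => []
  | f + 1, node, path =>
    if node ∈ path then [path]
    else (pvAdj d node).foldl (fun acc n => acc ++ pvDfsA d f n (path ++ [node])) []

def all_available_structure (next_acceptable_keys : List (String × List String)) : List (List String) :=
  next_acceptable_keys.foldl
    (fun paths kv => paths ++ pvDfsA next_acceptable_keys (next_acceptable_keys.length + 1) kv.1 [])
    []

-- ===== PORT B =====
-- fuel bound for the stack loop (a totality guard only; never exhausted under Pre_)
def pvFuelB (d : List (String × List String)) : Nat :=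
  ((d.flatMap Prod.snd).length + 2) ^ (d.length + 1)

-- B's while-loop over the explicit stack; stack top = list head, so Python's "push the
-- REVERSED neighbour list, pop from the end" is prepending the neighbour frames in order.
def pvRunB (d : List (String × List String)) : Nat → List (String × List String) → List (List String) → List (List String)
  | 0, _, paths => paths
  | _ + 1, [], paths => paths
  | f + 1, (node, path) :: rest, paths =>
    if node ∈ path then pvRunB d f rest (paths ++ [path])
    else pvRunB d f (((pvAdj d node).map (fun n => (n, path ++ [node]))) ++ rest) paths

def all_available_structure_alt (next_acceptable_keys : List (String × List String)) : List (List String) :=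
  next_acceptable_keys.foldl
    (fun paths kv => pvRunB next_acceptable_keys (pvFuelB next_acceptable_keys) [(kv.1, [])] paths)
    []

-- ===== PRECONDITION & SPEC =====
-- Pre_ excludes (a) association lists with duplicate keys, which a Python dict cannot hold
-- (the first-match reading here is a representation artefact), and (b) adjacency values that
-- are not keys themselves, on which the Python A raises KeyError.
def Pre_all_available_structure (next_acceptable_keys : List (String × List String)) : Prop :=
  (next_acceptable_keys.map Prod.fst).Nodup ∧
  ∀ p ∈ next_acceptable_keys, ∀ v ∈ p.2, v ∈ next_acceptable_keys.map Prod.fst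

instance (next_acceptable_keys : List (String × List String)) : Decidable (Pre_all_available_structure next_acceptable_keys) := by
  unfold Pre_all_available_structure; infer_instance

def pvWitness_all_available_structure : (List (String × List String)) :=
  [("a", ["b", "a"]), ("b", [])]

def Spec_all_available_structure (next_acceptable_keys : List (String × List String)) (out : List (List String)) : Prop := out = all_available_structure_alt next_acceptable_keys
instance (next_acceptable_keys : List (String × List String)) (out : List (List String)) : Decidable (Spec_all_available_structure next_acceptable_keys out) := by unfold Spec_all_available_structure; infer_instance

-- ===== CLAIM (what is proved, stated in full; the proofs are below) =====
def Claim_equal_all_available_structure : Prop := ∀ (next_acceptable_keys : List (String × List String)), Dom_all_available_structure next_acceptable_keys → Pre_all_available_structure next_acceptable_keys → Spec_all_available_structure next_acceptable_keys (all_available_structure next_acceptable_keys)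

-- ===== LEMMAS AND PROOFS =====

-- invariant carried by every DFS frame: the node and every path entry are keys, the path is nodup
def pvInv (d : List (String × List String)) (node : String) (path : List String) : Prop :=
  node ∈ d.map Prod.fst ∧ path.Nodup ∧ ∀ x ∈ path, x ∈ d.map Prod.fst

-- the weight of a frame for the stack machine's fuel measure
def pvW (d : List (String × List String)) (path : List String) : Nat :=
  ((d.flatMap Prod.snd).length + 2) ^ (d.length + 1 - path.length)

lemma pvSnoc_nodup (path : List String) (node : String)
    (hnd : path.Nodup) (hmem : node ∉ path) : (path ++ [node]).Nodup := by
  simp [List.nodup_append, hnd]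
  intro a ha h
  exact hmem (h ▸ ha)

lemma pvAdj_mem (d : List (String × List String)) (node : String)
    (h : node ∈ d.map Prod.fst) : (node, pvAdj d node) ∈ d := by
  induction d with
  | nil => simp at h
  | cons p rest ih =>
    obtain ⟨k, vs⟩ := p
    by_cases hk : k = node
    · subst hk; simp [pvAdj]
    · simp only [pvAdj, if_neg hk]
      refine List.mem_cons_of_mem _ (ih ?_)
      simp only [List.map_cons, List.mem_cons] at h
      rcases h with h | h
      · exact absurd h.symm hk
      · exact h

lemma pvAdj_closed (d : List (String × List String)) (node : String)
    (hpre : Pre_all_available_structure d) (h : node ∈ d.map Prod.fst) :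
    ∀ v ∈ pvAdj d node, v ∈ d.map Prod.fst :=
  hpre.2 (node, pvAdj d node) (pvAdj_mem d node h)

lemma pvMem_snd_len_le (d : List (String × List String)) (p : String × List String)
    (h : p ∈ d) : p.2.length ≤ (d.flatMap Prod.snd).length := by
  induction d with
  | nil => simp at h
  | cons q rest ih =>
    simp only [List.flatMap_cons, List.length_append]
    rcases List.mem_cons.mp h with rfl | h'
    · omega
    · have := ih h'; omega

lemma pvAdj_len_le (d : List (String × List String)) (node : String)
    (h : node ∈ d.map Prod.fst) : (pvAdj d node).length ≤ (d.flatMap Prod.snd).length :=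
  pvMem_snd_len_le d (node, pvAdj d node) (pvAdj_mem d node h)

lemma pvPath_len_le (d : List (String × List String)) (path : List String)
    (hnd : path.Nodup) (hsub : ∀ x ∈ path, x ∈ d.map Prod.fst) : path.length ≤ d.length := by
  have h1 : path.length = path.toFinset.card := (List.toFinset_card_of_nodup hnd).symm
  have h2 : path.toFinset ⊆ (d.map Prod.fst).toFinset := by
    intro x hx
    simp only [List.mem_toFinset] at *
    exact hsub x hx
  have h3 := Finset.card_le_card h2
  have h4 := List.toFinset_card_le (d.map Prod.fst)
  simp only [List.length_map] at h4
  omega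

lemma pvDfs_step (d : List (String × List String)) (hpre : Pre_all_available_structure d) :
    ∀ f node path, pvInv d node path → d.length + 1 ≤ f + path.length →
      pvDfsA d (f + 1) node path = pvDfsA d f node path := by
  intro f
  induction f with
  | zero =>
    intro node path hinv hb
    exfalso
    have := pvPath_len_le d path hinv.2.1 hinv.2.2
    omega
  | succ g ih =>
    intro node path hinv hb
    by_cases hmem : node ∈ path
    · simp [pvDfsA, hmem]
    · simp only [pvDfsA, if_neg hmem]
      apply PySem.List.foldl_congr_mem
      intro acc n hn
      congr 1
      refine ih n (path ++ [node])
        ⟨pvAdj_closed d node hpre hinv.1 n hn, pvSnoc_nodup path node hinv.2.1 hmem, ?_⟩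
        (by simp [List.length_append]; omega)
      intro x hx
      rcases List.mem_append.mp hx with h | h
      · exact hinv.2.2 x h
      · simp at h; subst h; exact hinv.1

lemma pvDfs_stable (d : List (String × List String)) (hpre : Pre_all_available_structure d)
    (node : String) (path : List String) (hinv : pvInv d node path) :
    ∀ f g, f ≤ g → d.length + 1 ≤ f + path.length →
      pvDfsA d g node path = pvDfsA d f node path := by
  intro f g hfg hbf
  induction g, hfg using Nat.le_induction with
  | base => rfl
  | succ g hg ih => rw [pvDfs_step d hpre g node path hinv (by omega), ih]

lemma pvRun_eq (d : List (String × List String)) (hpre : Pre_all_available_structure d) :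
    ∀ f stack paths, (∀ fr ∈ stack, pvInv d fr.1 fr.2) →
      (stack.map (fun fr => pvW d fr.2)).sum ≤ f →
      pvRunB d f stack paths =
        paths ++ stack.flatMap (fun fr => pvDfsA d (d.length + 1) fr.1 fr.2) := by
  intro f
  induction f using Nat.strong_induction_on with
  | _ f ih =>
    intro stack paths hinv hphi
    match stack with
    | [] => cases f <;> simp [pvRunB]
    | (node, path) :: rest =>
      have hinvh : pvInv d node path := hinv (node, path) (by simp)
      have hw1 : 1 ≤ pvW d path := Nat.one_le_pow _ _ (by omega)
      have hphi' : pvW d path + (rest.map (fun fr => pvW d fr.2)).sum ≤ f := by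
        simpa using hphi
      obtain ⟨f', rfl⟩ : ∃ f', f = f' + 1 := ⟨f - 1, by omega⟩
      by_cases hmem : node ∈ path
      · simp only [pvRunB, if_pos hmem]
        rw [ih f' (by omega) rest (paths ++ [path])
            (fun fr hfr => hinv fr (List.mem_cons_of_mem _ hfr)) (by omega)]
        simp [pvDfsA, hmem]
      · simp only [pvRunB, if_neg hmem]
        have hlen : path.length ≤ d.length := pvPath_len_le d path hinvh.2.1 hinvh.2.2
        have hsub' : ∀ x ∈ path ++ [node], x ∈ d.map Prod.fst := by
          intro x hx
          rcases List.mem_append.mp hx with h | h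
          · exact hinvh.2.2 x h
          · simp at h; subst h; exact hinvh.1
        have hchild : ∀ fr ∈ ((pvAdj d node).map (fun n => (n, path ++ [node]))) ++ rest,
            pvInv d fr.1 fr.2 := by
          intro fr hfr
          rcases List.mem_append.mp hfr with h | h
          · obtain ⟨n, hn, rfl⟩ := List.mem_map.mp h
            exact ⟨pvAdj_closed d node hpre hinvh.1 n hn,
              pvSnoc_nodup path node hinvh.2.1 hmem, hsub'⟩
          · exact hinv fr (List.mem_cons_of_mem _ h)
        have hc : (pvAdj d node).length ≤ (d.flatMap Prod.snd).length :=
          pvAdj_len_le d node hinvh.1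
        have hw1' : 1 ≤ pvW d (path ++ [node]) := Nat.one_le_pow _ _ (by omega)
        have hwsplit : pvW d path = ((d.flatMap Prod.snd).length + 2) * pvW d (path ++ [node]) := by
          unfold pvW
          have he : d.length + 1 - path.length = (d.length + 1 - (path ++ [node]).length) + 1 := by
            simp [List.length_append]; omega
          rw [he, pow_succ]
          ring
        have hmapchild : ((((pvAdj d node).map (fun n => (n, path ++ [node]))) ++ rest).map
            (fun fr => pvW d fr.2)).sum
            = (pvAdj d node).length * pvW d (path ++ [node])
              + (rest.map (fun fr => pvW d fr.2)).sum := by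
          rw [List.map_append, List.sum_append, List.map_map]
          simp only [Function.comp_def]
          rw [PySem.List.sum_map_const_nat]
        have hmul : (pvAdj d node).length * pvW d (path ++ [node])
            ≤ (d.flatMap Prod.snd).length * pvW d (path ++ [node]) :=
          Nat.mul_le_mul_right _ hc
        have hexp : ((d.flatMap Prod.snd).length + 2) * pvW d (path ++ [node])
            = (d.flatMap Prod.snd).length * pvW d (path ++ [node])
              + 2 * pvW d (path ++ [node]) := by ring
        have hphi'' : ((((pvAdj d node).map (fun n => (n, path ++ [node]))) ++ rest).map
            (fun fr => pvW d fr.2)).sum ≤ f' := by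
          rw [hmapchild]
          omega
        rw [ih f' (by omega) _ paths hchild hphi'']
        congr 1
        simp only [List.flatMap_append, List.flatMap_cons, List.flatMap_map]
        congr 1
        have hK : pvDfsA d (d.length + 1) node path
            = (pvAdj d node).flatMap (fun n => pvDfsA d d.length n (path ++ [node])) := by
          simp only [pvDfsA, if_neg hmem]
          rw [PySem.List.foldl_append_eq_flatMap]
          simp
        rw [hK]
        refine List.flatMap_congr ?_
        intro n hn
        exact pvDfs_stable d hpre n (path ++ [node])
          ⟨pvAdj_closed d node hpre hinvh.1 n hn, pvSnoc_nodup path node hinvh.2.1 hmem, hsub'⟩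
          d.length (d.length + 1) (by omega) (by simp [List.length_append])

-- ===== VERDICT (by name: the statement is the Claim_ definition above) =====
theorem all_available_structure_spec : Claim_equal_all_available_structure := by
  intro d hdom hpre
  unfold Spec_all_available_structure all_available_structure all_available_structure_alt
  symm
  apply PySem.List.foldl_congr_mem
  intro paths kv hkv
  rw [pvRun_eq d hpre (pvFuelB d) [(kv.1, [])] paths]
  · simp
  · intro fr hfr
    simp only [List.mem_singleton] at hfr
    subst hfr
    exact ⟨List.mem_map.mpr ⟨kv, hkv, rfl⟩, by simp, by simp⟩
  · simp [pvW, pvFuelB]
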